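-- pv_equiv track=rewrite | github.com/rlly-ritesh/CSW-Python | LearningBasics/extract_digits.py | extract_unique_digits
-- ===== SOURCE A (Python) =====
-- def extract_unique_digits(expression):
--     # Step 1: Create an empty list to store digits
--     digits = []
--     # Step 2: Go through each character in the expression
--     for char in expression:
--         # Step 3: Check if the character is a digit (0-9)
--         if char.isdigit():
--             # Step 4: Add it to the list if it's not already there
--             if char not in digits:
--                 digits.append(char)
--     # Step 5: Sort the digits in descending order
--     digits.sort(reverse=True)
--     # Step 6: Convert each digit from string to integer
--     result = [int(d) for d in digits]
--     # Step 7: Return the final list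
--     return result
-- ===== SOURCE B (Python) =====
-- def extract_unique_digits(expression):
--     # Collect the distinct digit characters, then enumerate 9..0 instead of sorting.
--     seen = {c for c in expression if c.isdigit()}
--     return [d for d in range(9, -1, -1) if str(d) in seen]
-- ===== Notes on version B (the rewrite author's own statement) =====
-- stated objective: idiomatic
-- what changed: Replaces the per-character linear membership scan plus list.sort with a set comprehension and a fixed 9-down-to-0 enumeration (counting-sort style): no sort and no inner list scan.
import Mathlib
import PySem

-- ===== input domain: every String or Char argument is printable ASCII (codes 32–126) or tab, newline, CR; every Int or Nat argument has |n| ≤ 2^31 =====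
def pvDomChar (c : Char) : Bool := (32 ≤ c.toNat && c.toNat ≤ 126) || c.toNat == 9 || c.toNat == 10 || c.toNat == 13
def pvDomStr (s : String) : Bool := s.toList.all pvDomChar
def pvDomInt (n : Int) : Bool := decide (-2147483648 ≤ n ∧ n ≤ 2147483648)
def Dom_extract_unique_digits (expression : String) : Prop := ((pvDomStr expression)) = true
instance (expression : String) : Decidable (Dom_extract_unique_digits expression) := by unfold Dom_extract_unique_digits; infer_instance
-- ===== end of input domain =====

-- B replaces A's linear dedup scan + list.sort with a set of seen digit chars and a fixed 9..0 enumeration (no sort); equal return values proved.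

-- ===== PORT A =====
-- for-loop with the in-place dedup append; then sort(reverse=True); then int() on each single digit char
def extract_unique_digits (expression : String) : List Int :=
  (PySem.List.sorted
    (expression.toList.foldl
      (fun digits char =>
        if PySem.Chars.isdigit char then
          if !digits.contains char then digits ++ [char] else digits
        else digits) [])
    (fun c => c) true).map (fun d => ((d.toNat : Int) - 48))   -- int(d) on each single digit char

-- ===== PORT B =====
-- str(d) for 0 ≤ d ≤ 9 is the single character with code 48 + d
def pvChr (d : Int) : Char := Char.ofNat (48 + d).toNat

def extract_unique_digits_alt (expression : String) : List Int :=
  (PySem.List.pyRange 9 (-1) (-1)).filter (fun d =>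
    PySem.Set.contains (PySem.Set.ofList (expression.toList.filter PySem.Chars.isdigit)) (pvChr d))

-- ===== PRECONDITION & SPEC =====
def Spec_extract_unique_digits (expression : String) (out : List Int) : Prop := out = extract_unique_digits_alt expression
instance (expression : String) (out : List Int) : Decidable (Spec_extract_unique_digits expression out) := by unfold Spec_extract_unique_digits; infer_instance

-- ===== CLAIM (what is proved, stated in full; the proofs are below) =====
def Claim_equal_extract_unique_digits : Prop := ∀ (expression : String), Dom_extract_unique_digits expression → Spec_extract_unique_digits expression (extract_unique_digits expression)

-- ===== LEMMAS AND PROOFS =====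

-- a digit character is one of '9'..'0'
theorem pv_isdigit_mem (c : Char) (h : PySem.Chars.isdigit c = true) :
    c ∈ ['9','8','7','6','5','4','3','2','1','0'] := by
  simp only [PySem.Chars.isdigit, Bool.and_eq_true, decide_eq_true_eq, Char.le_def,
    UInt32.le_iff_toNat_le] at h
  obtain ⟨h1, h2⟩ := h
  have e0 : ('0' : Char).val.toNat = 48 := by decide
  have e9 : ('9' : Char).val.toNat = 57 := by decide
  rw [e0] at h1; rw [e9] at h2
  have hb : 48 ≤ c.toNat ∧ c.toNat ≤ 57 := ⟨h1, h2⟩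
  rcases (by omega : c.toNat = 57 ∨ c.toNat = 56 ∨ c.toNat = 55 ∨ c.toNat = 54 ∨ c.toNat = 53 ∨
      c.toNat = 52 ∨ c.toNat = 51 ∨ c.toNat = 50 ∨ c.toNat = 49 ∨ c.toNat = 48) with
    h|h|h|h|h|h|h|h|h|h <;> (rw [← Char.ofNat_toNat c, h]; decide)

-- A's dedup loop over the whole string is Set.add folded over the digit characters
theorem pv_foldl_eq_set (l : List Char) (acc : PySem.Set Char) :
    l.foldl (fun digits char =>
      if PySem.Chars.isdigit char then
        if !digits.contains char then digits ++ [char] else digits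
      else digits) acc
    = (l.filter PySem.Chars.isdigit).foldl PySem.Set.add acc := by
  induction l generalizing acc with
  | nil => rfl
  | cons c t ih =>
      rw [List.foldl_cons, List.filter_cons]
      by_cases h : PySem.Chars.isdigit c
      · rw [if_pos h, if_pos h, List.foldl_cons, ih]
        congr 1
        simp only [PySem.Set.add]
        cases hc : acc.contains c
        · simp [show c ∉ acc by simpa using hc]
        · simp [show c ∈ acc by simpa using hc]
      · rw [if_neg h, if_neg h, ih]

theorem pv_map_filter (S : PySem.Set Char)
    (pairs : List (Int × Char)) (h : ∀ p ∈ pairs, pvChr p.1 = p.2 ∧ ((p.2.toNat : Int) - 48) = p.1) :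
    ((pairs.map Prod.snd).filter (fun c => decide (c ∈ S))).map (fun d => ((d.toNat : Int) - 48))
    = (pairs.map Prod.fst).filter (fun d => decide (pvChr d ∈ S)) := by
  induction pairs with
  | nil => rfl
  | cons p t ih =>
      obtain ⟨h1, h2⟩ := h p (List.mem_cons_self ..)
      simp only [List.map_cons, List.filter_cons, h1]
      by_cases hc : p.2 ∈ S
      · simp [hc, h2, ih (fun q hq => h q (List.mem_cons_of_mem _ hq))]
      · simp [hc, ih (fun q hq => h q (List.mem_cons_of_mem _ hq))]

-- ===== VERDICT (by name: the statement is the Claim_ definition above) =====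
theorem extract_unique_digits_spec : Claim_equal_extract_unique_digits := by
  intro expression _
  unfold Spec_extract_unique_digits extract_unique_digits extract_unique_digits_alt
  rw [pv_foldl_eq_set]
  rw [show ∀ l : List Char, l.foldl PySem.Set.add ([] : PySem.Set Char) = PySem.Set.ofList l
        from fun l => (PySem.Set.ofList_eq_foldl l).symm]
  set S : PySem.Set Char := PySem.Set.ofList (expression.toList.filter PySem.Chars.isdigit) with hS
  have hdig : ∀ c ∈ S, PySem.Chars.isdigit c = true := by
    intro c hc
    rw [hS, PySem.Set.mem_ofList] at hc
    exact (List.mem_filter.mp hc).2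
  have hnd : S.Nodup := PySem.Set.nodup_ofList _
  -- the sorted-descending list is the 9..0 digit chars filtered by membership in S
  have hsorted : PySem.List.sorted S (fun c => c) true
      = ['9','8','7','6','5','4','3','2','1','0'].filter (fun c => decide (c ∈ S)) := by
    apply PySem.List.sorted_rev_eq_of_perm_of_pairwise_gt
    · -- permutation: both nodup with the same membership
      apply (List.perm_ext_iff_of_nodup (List.Nodup.filter _ (by decide)) hnd).mpr
      intro c
      simp only [List.mem_filter]
      constructor
      · rintro ⟨-, hc⟩; simpa using hc
      · intro hc
        exact ⟨by simpa using pv_isdigit_mem c (hdig c hc), by simpa using hc⟩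
    · -- strictly decreasing
      exact List.Pairwise.filter _ (by decide)
  rw [hsorted]
  simp only [PySem.Set.contains, List.contains_eq_mem]
  have hrange : PySem.List.pyRange 9 (-1) (-1)
      = [(9 : Int), 8, 7, 6, 5, 4, 3, 2, 1, 0] := by decide
  rw [hrange]
  exact pv_map_filter S [(9,'9'),(8,'8'),(7,'7'),(6,'6'),(5,'5'),(4,'4'),(3,'3'),(2,'2'),(1,'1'),(0,'0')]
    (by decide)
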